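-- pv_equiv track=rewrite | github.com/Elana10/PythonDataStructuresExercise | 32_two_list_dictionary/two_list_dictionary.py | two_list_dictionary
-- ===== SOURCE A (Python) =====
-- def two_list_dictionary(keys, values):
--     """Given keys and values, make dictionary of those.
--
--         >>> two_list_dictionary(['x', 'y', 'z'], [9, 8, 7])
--         {'x': 9, 'y': 8, 'z': 7}
--
--     If there are fewer values than keys, remaining keys should have value
--     of None:
--
--         >>> two_list_dictionary(['a', 'b', 'c', 'd'], [1, 2, 3])
--         {'a': 1, 'b': 2, 'c': 3, 'd': None}
--
--     If there are fewer keys, ignore remaining values: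
--
--         >>> two_list_dictionary(['a', 'b', 'c'], [1, 2, 3, 4])
--         {'a': 1, 'b': 2, 'c': 3}
--    """
--     count = 0
--     new_dictionary = {}
--     if len(keys) == len(values) or len(keys) < len(values):
--         for k in keys:
--             new_dictionary[keys[count]] = values[count]
--             count += 1
--     else:
--         for k in keys:
--             try:
--                 new_dictionary[keys[count]] = values[count]
--                 count += 1
--             except IndexError:
--                 new_dictionary[keys[count]] = None
--                 count += 1
--
--     return new_dictionary
-- ===== SOURCE B (Python) =====
-- def two_list_dictionary(keys, values):
--     d = dict(zip(keys, values))
--     for k in keys[len(values):]: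
--         d[k] = None
--     return d
-- ===== Notes on version B (the rewrite author's own statement) =====
-- stated objective: simpler
-- what changed: Replaces A's single index-counting loop with two branches (length comparison plus try/except indexing) by dict(zip(keys, values)) for the paired part and a separate short padding pass over keys[len(values):] setting None.
import Mathlib
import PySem

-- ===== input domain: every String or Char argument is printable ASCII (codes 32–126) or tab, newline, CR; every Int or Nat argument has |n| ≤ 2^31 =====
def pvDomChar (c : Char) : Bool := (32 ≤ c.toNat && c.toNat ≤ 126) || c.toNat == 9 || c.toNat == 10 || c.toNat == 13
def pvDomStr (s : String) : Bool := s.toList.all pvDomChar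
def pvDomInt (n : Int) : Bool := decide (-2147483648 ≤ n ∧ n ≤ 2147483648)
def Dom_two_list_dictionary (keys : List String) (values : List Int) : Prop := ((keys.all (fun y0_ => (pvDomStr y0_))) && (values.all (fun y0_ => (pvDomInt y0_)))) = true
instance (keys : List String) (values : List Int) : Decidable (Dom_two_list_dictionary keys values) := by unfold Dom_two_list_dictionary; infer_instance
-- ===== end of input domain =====

-- B pairs keys with values via zip and pads leftover keys with None in a separate pass,
-- replacing A's counter-indexed branched loop; same return value everywhere (objective: simpler).

-- ===== PORT A =====
-- A's loop body indexes keys[count] and values[count]; count always stays in range of keys,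
-- so `(pyGet? keys st.2).getD ""` is exactly Python's keys[count] (the default is never used).
-- In the first branch count < len(values) as well, so inserting `pyGet? values st.2`
-- (always `some values[count]` there) is exactly `new_dictionary[keys[count]] = values[count]`.
-- In the second branch the try/except is the match: `none` is exactly Python's IndexError.
def two_list_dictionary (keys : List String) (values : List Int) : List (String × Option Int) :=
  if keys.length = values.length ∨ keys.length < values.length then
    (keys.foldl (fun (st : PySem.Dict String (Option Int) × Int) _k =>
        (st.1.insert ((PySem.List.pyGet? keys st.2).getD "") (PySem.List.pyGet? values st.2),
         st.2 + 1))
      (PySem.Dict.empty, 0)).1.items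
  else
    (keys.foldl (fun (st : PySem.Dict String (Option Int) × Int) _k =>
        match PySem.List.pyGet? values st.2 with
        | some v =>
            (st.1.insert ((PySem.List.pyGet? keys st.2).getD "") (some v), st.2 + 1)
        | none =>
            (st.1.insert ((PySem.List.pyGet? keys st.2).getD "") none, st.2 + 1))
      (PySem.Dict.empty, 0)).1.items

-- ===== PORT B =====
def two_list_dictionary_alt (keys : List String) (values : List Int) : List (String × Option Int) :=
  let d := (keys.zip values).foldl
      (fun (d : PySem.Dict String (Option Int)) p => d.insert p.1 (some p.2))
      PySem.Dict.empty
  ((PySem.List.slice keys (some (PySem.List.len values)) none).foldl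
      (fun (d : PySem.Dict String (Option Int)) k => d.insert k none) d).items

-- ===== PRECONDITION & SPEC =====
def Spec_two_list_dictionary (keys : List String) (values : List Int) (out : List (String × Option Int)) : Prop := out = two_list_dictionary_alt keys values
instance (keys : List String) (values : List Int) (out : List (String × Option Int)) : Decidable (Spec_two_list_dictionary keys values out) := by unfold Spec_two_list_dictionary; infer_instance

-- ===== CLAIM (what is proved, stated in full; the proofs are below) =====
def Claim_equal_two_list_dictionary : Prop := ∀ (keys : List String) (values : List Int), Dom_two_list_dictionary keys values → Spec_two_list_dictionary keys values (two_list_dictionary keys values)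

-- ===== LEMMAS AND PROOFS =====

-- Common description of both loops: consume keys and values in lockstep, inserting
-- `some v` while values last and `none` afterwards.
def pairsFill : List String → List Int → PySem.Dict String (Option Int) → PySem.Dict String (Option Int)
  | [], _, d => d
  | k :: ks, [], d => pairsFill ks [] (d.insert k none)
  | k :: ks, v :: vs, d => pairsFill ks vs (d.insert k (some v))

lemma loopA (keys : List String) (values : List Int) :
    ∀ (l : List String) (n : Nat) (d : PySem.Dict String (Option Int)),
      n + l.length = keys.length →
      (l.foldl (fun (st : PySem.Dict String (Option Int) × Int) _k =>
          (st.1.insert ((PySem.List.pyGet? keys st.2).getD "") (PySem.List.pyGet? values st.2),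
           st.2 + 1)) (d, (n : Int))).1
        = pairsFill (keys.drop n) (values.drop n) d := by
  intro l
  induction l with
  | nil =>
      intro n d h
      simp at h
      simp [List.foldl, h, pairsFill]
  | cons x l ih =>
      intro n d h
      have hn : n < keys.length := by simp at h; omega
      have hk : PySem.List.pyGet? keys (n : Int) = some keys[n] :=
        PySem.List.pyGet?_ofNat _ _ hn
      have hdropk : keys.drop n = keys[n] :: keys.drop (n + 1) :=
        List.drop_eq_getElem_cons hn
      have hcast : ((n : Int) + 1) = ((n + 1 : Nat) : Int) := by push_cast; ring
      simp only [List.foldl, hk, Option.getD_some, hcast]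
      have ih' := ih (n + 1)
        (d.insert keys[n] (PySem.List.pyGet? values (n : Int))) (by simp at h ⊢; omega)
      rw [ih', hdropk]
      by_cases hv : n < values.length
      · have : PySem.List.pyGet? values (n : Int) = some values[n] :=
          PySem.List.pyGet?_ofNat _ _ hv
        rw [this, List.drop_eq_getElem_cons hv, pairsFill]
      · have h1 : values.drop n = [] := List.drop_eq_nil_of_le (by omega)
        have h2 : values.drop (n + 1) = [] := List.drop_eq_nil_of_le (by omega)
        have : PySem.List.pyGet? values (n : Int) = none := by
          simp [PySem.List.pyGet?_natCast]; omega
        rw [this, h1, h2, pairsFill]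

-- the try/except step computes the same state update as the direct-insert step
lemma stepA_match_eq (keys : List String) (values : List Int) :
    (fun (st : PySem.Dict String (Option Int) × Int) (_k : String) =>
        match PySem.List.pyGet? values st.2 with
        | some v =>
            (st.1.insert ((PySem.List.pyGet? keys st.2).getD "") (some v), st.2 + 1)
        | none =>
            (st.1.insert ((PySem.List.pyGet? keys st.2).getD "") none, st.2 + 1))
      = (fun (st : PySem.Dict String (Option Int) × Int) (_k : String) =>
          (st.1.insert ((PySem.List.pyGet? keys st.2).getD "") (PySem.List.pyGet? values st.2),
           st.2 + 1)) := by
  funext st k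
  cases PySem.List.pyGet? values st.2 <;> rfl

lemma loopB :
    ∀ (ks : List String) (vs : List Int) (d : PySem.Dict String (Option Int)),
      ((ks.drop vs.length).foldl (fun d k => d.insert k none)
        ((ks.zip vs).foldl (fun d p => d.insert p.1 (some p.2)) d))
        = pairsFill ks vs d := by
  intro ks
  induction ks with
  | nil => intro vs d; simp [pairsFill]
  | cons k ks ih =>
      intro vs d
      cases vs with
      | nil =>
          simp only [List.zip_nil_right, List.foldl_nil, pairsFill]
          have := ih [] (d.insert k none)
          simpa using this
      | cons v vs =>
          simp only [List.zip_cons_cons, List.foldl_cons, List.length_cons,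
            List.drop_succ_cons, pairsFill]
          exact ih vs (d.insert k (some v))

-- ===== VERDICT (by name: the statement is the Claim_ definition above) =====
theorem two_list_dictionary_spec : Claim_equal_two_list_dictionary := by
  intro keys values _
  unfold Spec_two_list_dictionary two_list_dictionary two_list_dictionary_alt
  have hA := loopA keys values keys 0 PySem.Dict.empty (by simp)
  have hB := loopB keys values PySem.Dict.empty
  have hslice : PySem.List.slice keys (some (PySem.List.len values)) none
      = keys.drop values.length := by
    rw [PySem.List.len_eq, PySem.List.slice_from_natCast]
  split <;>
    simp only [stepA_match_eq keys values, Int.natCast_zero] at * <;>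
    rw [hA, hslice, hB] <;> simp
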